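-- pv_equiv track=rewrite | github.com/itsJD20/Bruteforce-login | brute_force.py | combineHeaders
-- ===== SOURCE A (Python) =====
-- def combineHeaders(headers):
--     keys = list(headers.keys())
--     l = len(keys)
--     headerComb = []
--     for i in range(1 << l):
--         headerKeySet = [keys[j] for j in range(l) if (i & (1 << j))]
--         tempHeader = {}
--         for h in headerKeySet:
--             tempHeader[h] = headers[h]
--         headerComb.append(tempHeader)
--     return headerComb
-- ===== SOURCE B (Python) =====
-- def combineHeaders(headers):
--     # iterative doubling powerset: each key doubles the list of subset-dicts
--     result = [{}]
--     for k, v in headers.items():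
--         result = result + [{**d, k: v} for d in result]
--     return result
-- ===== Notes on version B (the rewrite author's own statement) =====
-- stated objective: alternative
-- what changed: Replaced the bitmask enumeration (each subset rebuilt independently from the bits of its index, with an inner index scan and per-subset dict construction) by the iterative doubling powerset that extends previously built subset-dicts, producing the same subsets in the same order.
import Mathlib
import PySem

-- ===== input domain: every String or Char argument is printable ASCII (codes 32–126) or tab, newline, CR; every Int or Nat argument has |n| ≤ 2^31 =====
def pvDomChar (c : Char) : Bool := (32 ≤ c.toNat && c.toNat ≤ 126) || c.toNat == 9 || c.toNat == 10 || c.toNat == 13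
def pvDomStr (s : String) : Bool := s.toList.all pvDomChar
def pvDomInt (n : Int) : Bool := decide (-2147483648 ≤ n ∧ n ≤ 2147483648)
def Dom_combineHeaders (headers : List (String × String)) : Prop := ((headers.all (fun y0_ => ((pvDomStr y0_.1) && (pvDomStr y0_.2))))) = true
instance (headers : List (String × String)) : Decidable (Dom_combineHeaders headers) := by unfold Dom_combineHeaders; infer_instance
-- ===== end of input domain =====

-- B replaces A's bitmask enumeration of subsets by the iterative doubling powerset (result = result + extended copies); same output in the same order.

-- ===== PORT A =====
-- headers is a Python dict, modelled as an assoc list: normalize with Dict.ofList (last value wins, first position).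
def combineHeaders (headers : List (String × String)) : List (List (String × String)) :=
  let d := PySem.Dict.ofList headers
  let keys := d.keys
  let l := keys.length
  (PySem.List.pyRange 0 ((1 <<< l : Nat) : Int) 1).foldl
    (fun headerComb i =>
      -- 'i & (1 << j)' ported as Nat.testBit: exact here, i and j come from range(...) so both are ≥ 0
      let headerKeySet :=
        (PySem.List.pyRange 0 (l : Int) 1).foldl
          (fun acc j => if i.toNat.testBit j.toNat then acc ++ [(PySem.List.pyGet? keys j).getD ""] else acc) []
      -- keys[j] and headers[h] never fail: j < len(keys) and h ∈ keys; the .getD defaults are unreachable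
      let tempHeader := headerKeySet.foldl (fun t h => t.insert h (d.getD h "")) (PySem.Dict.empty)
      headerComb ++ [tempHeader.items])
    []

-- ===== PORT B =====
def combineHeaders_alt (headers : List (String × String)) : List (List (String × String)) :=
  (PySem.Dict.ofList headers).items.foldl
    (fun result kv => result ++ result.map (fun s => s ++ [kv]))
    [[]]

-- ===== PRECONDITION & SPEC =====
def Spec_combineHeaders (headers : List (String × String)) (out : List (List (String × String))) : Prop := out = combineHeaders_alt headers
instance (headers : List (String × String)) (out : List (List (String × String))) : Decidable (Spec_combineHeaders headers out) := by unfold Spec_combineHeaders; infer_instance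

-- ===== CLAIM (what is proved, stated in full; the proofs are below) =====
def Claim_equal_combineHeaders : Prop := ∀ (headers : List (String × String)), Dom_combineHeaders headers → Spec_combineHeaders headers (combineHeaders headers)

-- ===== LEMMAS AND PROOFS =====

-- reference form: subset n of kvs is the sublist of entries whose index-bit is set in n
def pvS (kvs : List (String × String)) : List (List (String × String)) :=
  (List.range (2 ^ kvs.length)).map (fun n =>
    ((List.range kvs.length).filter (fun j => n.testBit j)).map (fun j => kvs.getD j ("", "")))

theorem pvA_eq_S (headers : List (String × String)) :
    combineHeaders headers = pvS (PySem.Dict.ofList headers).items := by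
  simp only [combineHeaders]
  have hnd : (PySem.Dict.ofList headers).keys.Nodup := PySem.Dict.nodup_keys_ofList headers
  set d := PySem.Dict.ofList headers with hd
  set kvs := d.items with hkvs
  have hkeys : d.keys = kvs.map Prod.fst := rfl
  have hlen : d.keys.length = kvs.length := by simp [hkeys]
  rw [show ((1 <<< d.keys.length : Nat) : Int) = ((2 ^ kvs.length : Nat) : Int) by
        simp [Nat.shiftLeft_eq, hlen]]
  rw [PySem.List.foldl_append_singleton_eq_map
      (f := fun (i : Int) =>
        (((PySem.List.pyRange 0 (d.keys.length : Int) 1).foldl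
          (fun acc j => if i.toNat.testBit j.toNat then
              acc ++ [(PySem.List.pyGet? d.keys j).getD ""] else acc) []).foldl
          (fun t h => t.insert h (d.getD h "")) PySem.Dict.empty).items)]
  rw [PySem.List.pyRange_zero_natCast (2 ^ kvs.length), List.map_map]
  unfold pvS
  rw [List.nil_append]
  apply List.map_congr_left
  intro n hn
  simp only [Function.comp_apply]
  -- inner comprehension
  rw [PySem.List.pyRange_zero_natCast d.keys.length, List.foldl_map]
  have hbody : ∀ (acc : List String) (j : Nat),
      (if ((n : Int)).toNat.testBit ((j : Int)).toNat then
        acc ++ [(PySem.List.pyGet? d.keys (j : Int)).getD ""] else acc)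
      = (if n.testBit j then acc ++ [(d.keys[j]?).getD ""] else acc) := by
    intro acc j
    simp [PySem.List.pyGet?_natCast]
  simp only [hbody]
  rw [PySem.List.foldl_append_if (p := fun j => n.testBit j) (f := fun j => (d.keys[j]?).getD "")]
  rw [List.nil_append]
  have hsub : ∀ j ∈ (List.range d.keys.length).filter (fun j => n.testBit j), j < kvs.length := by
    intro j hj
    have := List.of_mem_filter hj
    have hm := List.mem_of_mem_filter hj
    simpa [hlen] using List.mem_range.mp hm
  have hnodupIdx : ((List.range d.keys.length).filter (fun j => n.testBit j)).Nodup :=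
    (List.nodup_range).filter _
  have hnodupKeys : (((List.range d.keys.length).filter (fun j => n.testBit j)).map
      (fun j => (d.keys[j]?).getD "")).Nodup := by
    refine List.Nodup.map_on ?_ hnodupIdx
    intro x hx y hy hxy
    have hxl : x < d.keys.length := by simpa [hlen] using hsub x hx
    have hyl : y < d.keys.length := by simpa [hlen] using hsub y hy
    rw [List.getElem?_eq_getElem hxl, List.getElem?_eq_getElem hyl] at hxy
    simp only [Option.getD_some] at hxy
    exact (hnd.getElem_inj_iff).mp hxy
  rw [List.foldl_map]
  rw [PySem.Dict.items_foldl_insert_fresh _ (fun j => (d.keys[j]?).getD "")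
      (fun j => d.getD ((d.keys[j]?).getD "") "") _
      (by intro a _; simp [PySem.Dict.contains_empty]) hnodupKeys]
  show PySem.Dict.empty.items ++ _ = _
  rw [show (PySem.Dict.empty (κ := String) (ν := String)).items = [] from rfl, List.nil_append, hlen]
  apply List.map_congr_left
  intro j hj
  have hjl : j < kvs.length := List.mem_range.mp (List.mem_of_mem_filter hj)
  have hjk : j < d.keys.length := by simpa [hlen] using hjl
  have hkey : (d.keys[j]?).getD "" = (kvs[j]).1 := by
    rw [List.getElem?_eq_getElem hjk]
    simp [hkeys]
  have hmem : ((kvs[j]).1, (kvs[j]).2) ∈ d.items := by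
    rw [Prod.mk.eta]; exact List.getElem_mem hjl
  have hval : d.getD (kvs[j]).1 "" = (kvs[j]).2 :=
    PySem.Dict.getD_of_mem_items d hmem hnd ""
  simp only [hkey, hval]
  rw [List.getD_eq_getElem _ _ hjl]

theorem pvS_eq_double (kvs : List (String × String)) :
    pvS kvs = kvs.foldl (fun result kv => result ++ result.map (fun s => s ++ [kv])) [[]] := by
  induction kvs using List.reverseRecOn with
  | nil => simp [pvS]
  | append_singleton kvs kv ih =>
    rw [List.foldl_append, ← ih]
    unfold pvS
    simp only [List.length_append, List.length_singleton, List.foldl_cons, List.foldl_nil]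
    rw [pow_succ, Nat.mul_two, List.range_add (n := 2 ^ kvs.length) (m := 2 ^ kvs.length), List.map_append, List.map_map]
    congr 1
    · -- low half: bit kvs.length is 0
      apply List.map_congr_left
      intro n hn
      have hnlt : n < 2 ^ kvs.length := List.mem_range.mp hn
      rw [List.range_add (n := kvs.length) (m := 1)]
      simp only [List.range_one, List.map_cons, List.map_nil, List.filter_append, List.filter_cons,
        List.filter_nil, Nat.add_zero]
      rw [Nat.testBit_lt_two_pow hnlt]
      simp only [Bool.false_eq_true, reduceIte, List.append_nil]
      apply List.map_congr_left
      intro j hj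
      have hjl : j < kvs.length := List.mem_range.mp (List.mem_of_mem_filter hj)
      rw [List.getD_eq_getElem _ _ (by simp; omega), List.getD_eq_getElem _ _ hjl]
      exact List.getElem_append_left hjl
    · -- high half: n = 2^l + m
      rw [List.map_map]
      apply List.map_congr_left
      intro m hm
      simp only [Function.comp_apply]
      have hmlt : m < 2 ^ kvs.length := List.mem_range.mp hm
      rw [List.range_add (n := kvs.length) (m := 1)]
      simp only [List.range_one, List.map_cons, List.map_nil, List.filter_append, List.filter_cons,
        List.filter_nil, Nat.add_zero]
      have hbitl : (2 ^ kvs.length + m).testBit kvs.length = true := by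
        rw [Nat.testBit_two_pow_add_eq]
        simp [Nat.testBit_lt_two_pow hmlt]
      rw [hbitl]
      simp only [if_pos]
      have hfilt : (List.range kvs.length).filter (fun j => (2 ^ kvs.length + m).testBit j)
          = (List.range kvs.length).filter (fun j => m.testBit j) := by
        apply List.filter_congr
        intro j hj
        exact Nat.testBit_two_pow_add_gt (List.mem_range.mp hj) m
      rw [hfilt, List.map_append]
      congr 1
      · apply List.map_congr_left
        intro j hj
        have hjl : j < kvs.length := List.mem_range.mp (List.mem_of_mem_filter hj)
        rw [List.getD_eq_getElem _ _ (by simp; omega), List.getD_eq_getElem _ _ hjl]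
        exact List.getElem_append_left hjl
      · simp

-- ===== VERDICT (by name: the statement is the Claim_ definition above) =====
theorem combineHeaders_spec : Claim_equal_combineHeaders := by
  intro headers _
  unfold Spec_combineHeaders combineHeaders_alt
  rw [pvA_eq_S, pvS_eq_double]
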